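-- pv_equiv track=rewrite | github.com/mussolene/1c_hbk_helper | src/onec_help/standards_loader.py | _first_paragraph
-- ===== SOURCE A (Python) =====
-- def _first_paragraph(content: str) -> str:
--     """Extract first non-empty paragraph (up to 200 chars)."""
--     lines = content.strip().split("\n")
--     para: list[str] = []
--     for line in lines:
--         line = line.strip()
--         if line.startswith("#") or line.startswith("|") or line.startswith("-"):
--             if para:
--                 break
--             continue
--         if not line:
--             if para:
--                 break
--             continue
--         para.append(line)
--         if len(" ".join(para)) >= 200:
--             break
--     return " ".join(para)[:300].strip()
-- ===== SOURCE B (Python) =====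
-- def _first_paragraph(content: str) -> str:
--     """Extract first non-empty paragraph (up to 200 chars)."""
--     lines = [l.strip() for l in content.strip().split("\n")]
--     skip = [l.startswith(("#", "|", "-")) or not l for l in lines]
--     if False not in skip:
--         return ""
--     i = skip.index(False)
--     tail = skip[i:]
--     j = i + (tail.index(True) if True in tail else len(tail))
--     block = lines[i:j]
--     cut = len(block)
--     running = -1
--     for k, l in enumerate(block):
--         running += len(l) + 1
--         if running >= 200:
--             cut = k + 1
--             break
--     return " ".join(block[:cut])[:300].strip()
-- ===== Notes on version B (the rewrite author's own statement) =====
-- stated objective: alternative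
-- what changed: B replaces A's single stateful accumulate-and-rejoin loop (continue/break on a para-nonempty flag, re-joining para every iteration) by index arithmetic: it precomputes a skip-flag list, finds the paragraph's start and end with list.index, picks the cut point with a running character count instead of repeated joins, and joins exactly once at the end.
import Mathlib
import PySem

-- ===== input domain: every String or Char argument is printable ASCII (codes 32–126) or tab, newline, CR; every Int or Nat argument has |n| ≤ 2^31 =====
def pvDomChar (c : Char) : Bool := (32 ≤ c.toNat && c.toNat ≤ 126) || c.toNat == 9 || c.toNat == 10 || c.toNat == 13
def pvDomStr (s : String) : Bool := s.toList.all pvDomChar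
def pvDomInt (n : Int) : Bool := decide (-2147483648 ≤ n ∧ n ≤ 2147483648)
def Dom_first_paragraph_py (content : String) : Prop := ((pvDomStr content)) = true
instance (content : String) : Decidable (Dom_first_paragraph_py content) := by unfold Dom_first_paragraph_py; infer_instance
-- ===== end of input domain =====

-- B replaces A's single stateful accumulate-and-rejoin loop by index arithmetic: it finds the
-- paragraph's boundaries with list.index over a precomputed skip-flag list, determines the cut
-- point with a running character count (no repeated joins), and joins exactly once (alternative).

-- ===== PORT A =====
-- A's for-loop, state = para; continue = recurse with same para, break = return para.
def pvALoop (lines : List String) (para : List String) : List String :=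
  match lines with
  | [] => para
  | l :: rest =>
    let line := PySem.Str.strip l
    if PySem.Str.startswith line "#" || PySem.Str.startswith line "|" || PySem.Str.startswith line "-" then
      if para ≠ [] then para else pvALoop rest para
    else if line = "" then
      if para ≠ [] then para else pvALoop rest para
    else
      let para' := para ++ [line]
      if 200 ≤ PySem.Str.len (PySem.Str.join " " para') then para' else pvALoop rest para'

def first_paragraph_py (content : String) : String :=
  -- content.strip().split("\n"): split? is `some` here since the separator is nonempty
  let lines := (PySem.Str.split? (PySem.Str.strip content) "\n").getD []
  let para := pvALoop lines []
  PySem.Str.strip (PySem.Str.slice (PySem.Str.join " " para) none (some 300))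

-- ===== PORT B =====
-- skip flag: l.startswith(('#','|','-')) or not l
def pvIsSkip (l : String) : Bool :=
  PySem.Str.startswith l "#" || PySem.Str.startswith l "|" || PySem.Str.startswith l "-" || l == ""

-- B's running-length loop: cut = len(block); for k,l in enumerate(block): running += len(l)+1; break with cut = k+1
def pvCutLoop (ls : List String) (running : Int) (k : Int) (cut : Int) : Int :=
  match ls with
  | [] => cut
  | l :: rest =>
    let running' := running + PySem.Str.len l + 1
    if 200 ≤ running' then k + 1
    else pvCutLoop rest running' (k + 1) cut

def first_paragraph_py_alt (content : String) : String :=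
  let lines := ((PySem.Str.split? (PySem.Str.strip content) "\n").getD []).map PySem.Str.strip
  let skip := lines.map pvIsSkip
  if false ∈ skip then
    let i : Int := ((PySem.List.index? skip false).getD 0 : Nat)
    let tail := PySem.List.slice skip (some i) none
    let j : Int := i + (if true ∈ tail then (((PySem.List.index? tail true).getD 0 : Nat) : Int) else PySem.List.len tail)
    let block := PySem.List.slice lines (some i) (some j)
    let cut : Int := pvCutLoop block (-1) 0 (PySem.List.len block)
    PySem.Str.strip (PySem.Str.slice (PySem.Str.join " " (PySem.List.slice block none (some cut))) none (some 300))
  else ""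

-- ===== PRECONDITION & SPEC =====
def Spec_first_paragraph_py (content : String) (out : String) : Prop := out = first_paragraph_py_alt content
instance (content : String) (out : String) : Decidable (Spec_first_paragraph_py content out) := by unfold Spec_first_paragraph_py; infer_instance

-- ===== CLAIM =====
def Claim_equal_first_paragraph_py : Prop := ∀ (content : String), Dom_first_paragraph_py content → Spec_first_paragraph_py content (first_paragraph_py content)

-- ===== LEMMAS AND PROOFS =====

-- Proof-only model of A's collecting phase: append lines, re-join, break at 200.
def pvBLoop (block : List String) (para : List String) : List String :=
  match block with
  | [] => para
  | l :: rest =>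
    let para' := para ++ [l]
    if 200 ≤ PySem.Str.len (PySem.Str.join " " para') then para' else pvBLoop rest para'

-- Once para is nonempty, A breaks at the first skip line: it equals pvBLoop over the takeWhile block.
theorem pvALoop_nonempty (lines : List String) (para : List String) (h : para ≠ []) :
    pvALoop lines para = pvBLoop ((lines.map PySem.Str.strip).takeWhile (fun l => !pvIsSkip l)) para := by
  induction lines generalizing para with
  | nil => rfl
  | cons l rest ih =>
    rw [List.map_cons, List.takeWhile_cons]
    by_cases hs : pvIsSkip (PySem.Str.strip l) = true
    · rw [hs]
      simp only [Bool.not_true, Bool.false_eq_true, if_false, pvBLoop, pvALoop]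
      by_cases hb : (PySem.Str.startswith (PySem.Str.strip l) "#"
          || PySem.Str.startswith (PySem.Str.strip l) "|"
          || PySem.Str.startswith (PySem.Str.strip l) "-") = true
      · rw [if_pos hb, if_pos h]
      · have he : PySem.Str.strip l = "" := by
          simp only [pvIsSkip, Bool.or_eq_true, beq_iff_eq] at hs
          rcases hs with ((hc | hc) | hc) | hc
          · exact absurd (by simp only [hc, Bool.true_or]) hb
          · exact absurd (by simp only [hc, Bool.true_or, Bool.or_true]) hb
          · exact absurd (by simp only [hc, Bool.or_true]) hb
          · exact hc
        rw [if_neg hb, if_pos he, if_pos h]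
    · have hns : pvIsSkip (PySem.Str.strip l) = false := by simpa using hs
      have h1 : ¬ (PySem.Str.startswith (PySem.Str.strip l) "#"
          || PySem.Str.startswith (PySem.Str.strip l) "|"
          || PySem.Str.startswith (PySem.Str.strip l) "-") = true := by
        intro hc; apply hs; simp only [pvIsSkip, hc, Bool.true_or]
      have h2 : ¬ PySem.Str.strip l = "" := by
        intro hc; apply hs; simp [pvIsSkip, hc]
      rw [hns]
      simp only [Bool.not_false, if_true, pvALoop, pvBLoop]
      rw [if_neg h1, if_neg h2]
      split
      · rfl
      · exact ih _ (by simp)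

theorem pvALoop_empty (lines : List String) :
    pvALoop lines [] =
      pvBLoop (((lines.map PySem.Str.strip).dropWhile pvIsSkip).takeWhile (fun l => !pvIsSkip l)) [] := by
  induction lines with
  | nil => rfl
  | cons l rest ih =>
    rw [List.map_cons, List.dropWhile_cons]
    by_cases hs : pvIsSkip (PySem.Str.strip l) = true
    · rw [hs]
      simp only [if_true]
      rw [← ih]
      simp only [pvALoop, ne_eq, not_true_eq_false, if_false]
      by_cases hb : (PySem.Str.startswith (PySem.Str.strip l) "#"
          || PySem.Str.startswith (PySem.Str.strip l) "|"
          || PySem.Str.startswith (PySem.Str.strip l) "-") = true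
      · simp only [hb, if_true]
      · have he : PySem.Str.strip l = "" := by
          simp only [pvIsSkip, Bool.or_eq_true, beq_iff_eq] at hs
          rcases hs with ((hc | hc) | hc) | hc
          · exact absurd (by simp only [hc, Bool.true_or]) hb
          · exact absurd (by simp only [hc, Bool.true_or, Bool.or_true]) hb
          · exact absurd (by simp only [hc, Bool.or_true]) hb
          · exact hc
        rw [if_neg hb, if_pos he]
    · have hns : pvIsSkip (PySem.Str.strip l) = false := by simpa using hs
      have h1 : ¬ (PySem.Str.startswith (PySem.Str.strip l) "#"
          || PySem.Str.startswith (PySem.Str.strip l) "|"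
          || PySem.Str.startswith (PySem.Str.strip l) "-") = true := by
        intro hc; apply hs; simp only [pvIsSkip, hc, Bool.true_or]
      have h2 : ¬ PySem.Str.strip l = "" := by
        intro hc; apply hs; simp [pvIsSkip, hc]
      rw [hns, if_neg (by simp), List.takeWhile_cons, hns]
      simp only [Bool.not_false, if_true, pvALoop, pvBLoop]
      rw [if_neg h1, if_neg h2]
      simp only [List.nil_append]
      split
      · rfl
      · exact pvALoop_nonempty rest [PySem.Str.strip l] (by simp)

-- length of ' '.join over a nonempty list: sum of lengths plus one per separator
theorem pvJoinLen (c : Char) (cs : List (List Char)) (h : cs ≠ []) :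
    (PySem.Chars.join [c] cs).length = (cs.map List.length).sum + (cs.length - 1) := by
  induction cs with
  | nil => exact absurd rfl h
  | cons a rest ih =>
    cases rest with
    | nil => simp [PySem.Chars.join_singleton]
    | cons b t =>
      rw [PySem.Chars.join_cons_cons]
      rw [List.length_append, List.length_append, ih (by simp)]
      simp only [List.length_cons, List.length_nil, List.map_cons, List.sum_cons]
      omega

-- appending one more part to the join
theorem pvLenJoinAppend (para : List String) (l : String) :
    PySem.Str.len (PySem.Str.join " " (para ++ [l])) =
      if para = [] then PySem.Str.len l
      else PySem.Str.len (PySem.Str.join " " para) + 1 + PySem.Str.len l := by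
  have hsp : (" " : String).toList = [' '] := rfl
  cases para with
  | nil =>
    simp [PySem.Str.len_eq, PySem.Str.toList_join, hsp, PySem.Chars.join_singleton]
  | cons a rest =>
    rw [if_neg (by simp)]
    simp only [PySem.Str.len_eq, PySem.Str.toList_join, hsp]
    rw [pvJoinLen ' ' _ (by simp), pvJoinLen ' ' _ (by simp)]
    simp only [List.map_append, List.map_cons, List.map_map, List.sum_append,
      List.length_append, List.length_cons, List.length_nil, List.map_nil, List.sum_cons,
      List.sum_nil]
    push_cast
    omega

-- B's running-count loop computes exactly the number of lines A's rejoin loop keeps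
theorem pvCut_spec (ls : List String) : ∀ (para : List String) (r k : Int),
    r = (if para = [] then (-1 : Int) else PySem.Str.len (PySem.Str.join " " para)) →
    ∃ m : Nat, pvCutLoop ls r k (k + ls.length) = k + m ∧
      pvBLoop ls para = para ++ ls.take m := by
  induction ls with
  | nil =>
    intro para r k _
    exact ⟨0, by simp [pvCutLoop], by simp [pvBLoop]⟩
  | cons l rest ih =>
    intro para r k hr
    have hlen : PySem.Str.len (PySem.Str.join " " (para ++ [l])) = r + PySem.Str.len l + 1 := by
      rw [pvLenJoinAppend, hr]; split_ifs <;> ring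
    simp only [pvCutLoop, pvBLoop]
    by_cases hb : (200 : Int) ≤ r + PySem.Str.len l + 1
    · refine ⟨1, ?_, ?_⟩
      · rw [if_pos hb]; push_cast; ring
      · rw [if_pos (by rw [hlen]; exact hb)]
        simp
    · obtain ⟨m, hm1, hm2⟩ := ih (para ++ [l]) (r + PySem.Str.len l + 1) (k + 1)
        (by rw [if_neg (by simp), ← hlen])
      refine ⟨m + 1, ?_, ?_⟩
      · rw [if_neg hb]
        have e : k + ((l :: rest).length : Int) = (k + 1) + (rest.length : Int) := by
          push_cast [List.length_cons]; ring
        rw [e, hm1]; push_cast; ring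
      · rw [if_neg (by rw [hlen]; exact hb), hm2, List.take_succ_cons]
        simp

-- list.index(False) over the skip flags finds the end of the dropWhile prefix
theorem pvIndex_drop (xs : List String) : ∀ (i : Nat),
    PySem.List.index? (xs.map pvIsSkip) false = some i →
    xs.dropWhile pvIsSkip = xs.drop i := by
  induction xs with
  | nil =>
    intro i h
    rw [PySem.List.index?_eq_idxOf?] at h
    simp at h
  | cons x rest ih =>
    intro i h
    rw [List.map_cons] at h
    by_cases hx : pvIsSkip x = true
    · rw [hx, PySem.List.index?_cons_of_ne _ (by simp)] at h
      cases hh : PySem.List.index? (rest.map pvIsSkip) false with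
      | none => rw [hh] at h; simp at h
      | some i' =>
        rw [hh] at h
        obtain rfl : i = i' + 1 := by simpa using h.symm
        rw [List.dropWhile_cons, hx, if_pos rfl, List.drop_succ_cons]
        exact ih i' hh
    · have hx' : pvIsSkip x = false := by simpa using hx
      rw [hx', PySem.List.index?_cons_self] at h
      obtain rfl : i = 0 := by simpa using h.symm
      rw [List.dropWhile_cons, hx']
      simp

-- list.index(True) over the remaining flags finds the end of the takeWhile block
theorem pvIndex_take (xs : List String) :
    xs.takeWhile (fun l => !pvIsSkip l) =
      xs.take (if true ∈ xs.map pvIsSkip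
               then (PySem.List.index? (xs.map pvIsSkip) true).getD 0
               else (xs.map pvIsSkip).length) := by
  induction xs with
  | nil => simp
  | cons x rest ih =>
    rw [List.map_cons, List.takeWhile_cons]
    by_cases hx : pvIsSkip x = true
    · rw [hx]
      have hm : true ∈ true :: rest.map pvIsSkip := by simp
      rw [if_pos hm, PySem.List.index?_cons_self]
      simp
    · have hx' : pvIsSkip x = false := by simpa using hx
      rw [hx']
      simp only [Bool.not_false, if_true]
      rw [PySem.List.index?_cons_of_ne _ (by simp)]
      by_cases hm : true ∈ rest.map pvIsSkip
      · obtain ⟨t, ht⟩ := Option.isSome_iff_exists.mp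
          ((PySem.List.index?_isSome_iff (rest.map pvIsSkip) true).2 hm)
        rw [if_pos (by simp [hm]), ht]
        simp only [Option.map_some, Option.getD_some, List.take_succ_cons]
        rw [ih, if_pos hm, ht]
        simp
      · rw [if_neg (by simp [hm]), ih, if_neg hm]
        simp

-- ===== VERDICT =====
theorem first_paragraph_py_spec : Claim_equal_first_paragraph_py := by
  intro content _
  simp only [Spec_first_paragraph_py, first_paragraph_py, first_paragraph_py_alt]
  rw [pvALoop_empty]
  generalize ((PySem.Str.split? (PySem.Str.strip content) "\n").getD []).map PySem.Str.strip = lines at *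
  by_cases hmem : false ∈ lines.map pvIsSkip
  · rw [if_pos hmem]
    obtain ⟨i, hi⟩ := Option.isSome_iff_exists.mp
      ((PySem.List.index?_isSome_iff (lines.map pvIsSkip) false).2 hmem)
    rw [hi]
    simp only [Option.getD_some]
    rw [PySem.List.slice_from_natCast, ← List.map_drop, PySem.List.len_eq]
    have hcast : (if true ∈ (lines.drop i).map pvIsSkip
          then (((PySem.List.index? ((lines.drop i).map pvIsSkip) true).getD 0 : Nat) : Int)
          else (((lines.drop i).map pvIsSkip).length : Int))
        = (((if true ∈ (lines.drop i).map pvIsSkip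
          then ((PySem.List.index? ((lines.drop i).map pvIsSkip) true).getD 0 : Nat)
          else ((lines.drop i).map pvIsSkip).length) : Nat) : Int) := by
      split <;> rfl
    rw [hcast, PySem.List.slice_natCast_add]
    rw [pvIndex_drop lines i hi, pvIndex_take (lines.drop i)]
    generalize (List.take _ (List.drop i lines)) = block
    obtain ⟨m, hm1, hm2⟩ := pvCut_spec block [] (-1) 0 rfl
    have hm1' : pvCutLoop block (-1) 0 (PySem.List.len block) = (m : Int) := by
      rw [PySem.List.len_eq]
      simpa using hm1
    rw [hm1', PySem.List.slice_to_natCast, hm2]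
    simp
  · rw [if_neg hmem]
    have hall : lines.dropWhile pvIsSkip = [] := by
      rw [List.dropWhile_eq_nil_iff]
      intro x hx
      by_contra hc
      exact hmem (List.mem_map.mpr ⟨x, hx, by simpa using hc⟩)
    rw [hall]
    decide
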